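-- pv_equiv track=rewrite | github.com/AnonymousSubm/ICAPS_2023_Submission | Task_Planner.py | separate_common_beliefs
-- ===== SOURCE A (Python) =====
-- def separate_common_beliefs(agent_beliefs, common_beliefs):
--     non_common_beliefs = []
--     shared_beliefs = {}
--     for belief in agent_beliefs:
--         k = belief['name']
--         if k in common_beliefs.keys():
--             if k not in shared_beliefs.keys():
--                 shared_beliefs.update({k: [belief]})
--             else:
--                 shared_beliefs[k].append(belief)
--         else:
--             non_common_beliefs.append(belief)
--     return (shared_beliefs, non_common_beliefs)
-- ===== SOURCE B (Python) =====
-- def separate_common_beliefs(agent_beliefs, common_beliefs):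
--     # Precompute every belief's name once, the common-key set once, and the
--     # ordered list of distinct common names; then group by repeated scans.
--     names = [b['name'] for b in agent_beliefs]
--     common = set(common_beliefs)
--     keys = []
--     for nm in names:
--         if nm in common and nm not in keys:
--             keys.append(nm)
--     shared_beliefs = {k: [b for b, nm in zip(agent_beliefs, names) if nm == k]
--                       for k in keys}
--     non_common_beliefs = [b for b, nm in zip(agent_beliefs, names) if nm not in common]
--     return (shared_beliefs, non_common_beliefs)
-- ===== Notes on version B (the rewrite author's own statement) =====
-- stated objective: alternative
-- what changed: Replaces A's single incremental pass (branching dict-append loop) with a staged plan: precompute all names and the common-key set, build the ordered list of distinct common names, then materialise each shared group by its own scan (a dict comprehension of per-key filters) and the leftovers by one more filter.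
import Mathlib
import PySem

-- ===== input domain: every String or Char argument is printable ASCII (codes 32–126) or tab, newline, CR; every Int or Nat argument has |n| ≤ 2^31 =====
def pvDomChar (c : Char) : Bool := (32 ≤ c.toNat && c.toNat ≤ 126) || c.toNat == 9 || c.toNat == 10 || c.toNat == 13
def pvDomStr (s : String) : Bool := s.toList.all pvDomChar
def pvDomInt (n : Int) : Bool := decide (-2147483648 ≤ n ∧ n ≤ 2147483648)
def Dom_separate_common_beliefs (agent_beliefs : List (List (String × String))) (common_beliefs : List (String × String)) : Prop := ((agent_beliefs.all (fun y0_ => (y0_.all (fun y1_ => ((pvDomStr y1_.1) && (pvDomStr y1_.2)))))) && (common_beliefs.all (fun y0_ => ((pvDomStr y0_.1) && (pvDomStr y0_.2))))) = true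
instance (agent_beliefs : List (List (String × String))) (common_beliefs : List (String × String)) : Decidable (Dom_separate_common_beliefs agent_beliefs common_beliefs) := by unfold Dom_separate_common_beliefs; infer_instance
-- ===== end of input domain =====

-- ===== PORT A =====
-- Header: B is an alternative staged plan (precomputed names/common set, ordered
-- distinct-key list, per-key filter scans) vs A's single incremental pass; the
-- return value is proved identical on Pre_.

-- belief['name'] : value of key "name" in the belief dict (Pre_ guarantees the key exists)
def pvBeliefName (b : List (String × String)) : String :=
  (PySem.Dict.ofList b).getD "name" ""

-- 'k in common_beliefs.keys()'
def pvIsCommonKey (common_beliefs : List (String × String)) (k : String) : Bool :=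
  common_beliefs.any (fun p => p.1 == k)

def separate_common_beliefs (agent_beliefs : List (List (String × String))) (common_beliefs : List (String × String)) : (List (String × List (List (String × String)))) × (List (List (String × String))) :=
  let st := agent_beliefs.foldl
    (fun (st : PySem.Dict String (List (List (String × String))) × List (List (String × String))) belief =>
      let k := pvBeliefName belief
      if pvIsCommonKey common_beliefs k then
        if st.1.contains k then (st.1.modify k [] (fun l => l ++ [belief]), st.2)
        else (st.1.insert k [belief], st.2)
      else (st.1, st.2 ++ [belief]))
    (PySem.Dict.empty, [])
  (st.1.items, st.2)

-- ===== PORT B =====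
def separate_common_beliefs_alt (agent_beliefs : List (List (String × String))) (common_beliefs : List (String × String)) : (List (String × List (List (String × String)))) × (List (List (String × String))) :=
  let names := agent_beliefs.map pvBeliefName
  let common : PySem.Set String := PySem.Set.ofList (common_beliefs.map Prod.fst)
  let keys := names.foldl
    (fun (ks : List String) nm =>
      if PySem.Set.contains common nm && !(ks.contains nm) then ks ++ [nm] else ks) []
  let shared := keys.map
    (fun k => (k, ((agent_beliefs.zip names).filter (fun p => p.2 == k)).map Prod.fst))
  let non_common := ((agent_beliefs.zip names).filter
      (fun p => !(PySem.Set.contains common p.2))).map Prod.fst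
  (shared, non_common)

-- ===== PRECONDITION & SPEC =====
-- Pre_ excludes agent beliefs lacking a "name" key, on which Python A raises KeyError.
def Pre_separate_common_beliefs (agent_beliefs : List (List (String × String))) (common_beliefs : List (String × String)) : Prop :=
  ∀ b ∈ agent_beliefs, (b.map Prod.fst).contains "name" = true
instance (agent_beliefs : List (List (String × String))) (common_beliefs : List (String × String)) : Decidable (Pre_separate_common_beliefs agent_beliefs common_beliefs) := by unfold Pre_separate_common_beliefs; infer_instance

def pvWitness_separate_common_beliefs : (List (List (String × String))) × (List (String × String)) :=
  ([[("name", "x")], [("name", "y")]], [("x", "v")])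

def Spec_separate_common_beliefs (agent_beliefs : List (List (String × String))) (common_beliefs : List (String × String)) (out : (List (String × List (List (String × String)))) × (List (List (String × String)))) : Prop := out = separate_common_beliefs_alt agent_beliefs common_beliefs
instance (agent_beliefs : List (List (String × String))) (common_beliefs : List (String × String)) (out : (List (String × List (List (String × String)))) × (List (List (String × String)))) : Decidable (Spec_separate_common_beliefs agent_beliefs common_beliefs out) := by unfold Spec_separate_common_beliefs; infer_instance

-- ===== CLAIM (what is proved, stated in full; the proofs are below) =====
def Claim_equal_separate_common_beliefs : Prop := ∀ (agent_beliefs : List (List (String × String))) (common_beliefs : List (String × String)), Dom_separate_common_beliefs agent_beliefs common_beliefs → Pre_separate_common_beliefs agent_beliefs common_beliefs → Spec_separate_common_beliefs agent_beliefs common_beliefs (separate_common_beliefs agent_beliefs common_beliefs)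

-- ===== LEMMAS AND PROOFS =====

theorem pvCommon_eq (cb : List (String × String)) (k : String) :
    PySem.Set.contains (PySem.Set.ofList (cb.map Prod.fst)) k = pvIsCommonKey cb k := by
  have h : (PySem.Set.contains (PySem.Set.ofList (cb.map Prod.fst)) k = true) ↔ (pvIsCommonKey cb k = true) := by
    simp only [PySem.Set.contains_iff, PySem.Set.mem_ofList, List.mem_map, pvIsCommonKey,
      List.any_eq_true, beq_iff_eq]
  exact Bool.coe_iff_coe.mp h

theorem pvZipFilter (ab : List (List (String × String))) (q : String → Bool) :
    ((ab.zip (ab.map pvBeliefName)).filter (fun p => q p.2)).map Prod.fst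
      = ab.filter (fun b => q (pvBeliefName b)) := by
  induction ab with
  | nil => rfl
  | cons a ab ih =>
    simp only [List.map_cons, List.zip_cons_cons, List.filter_cons]
    cases h : q (pvBeliefName a)
    · simp [ih]
    · simp [ih]

theorem pvStepA (d : PySem.Dict String (List (List (String × String)))) (k : String) (b : List (String × String)) :
    (if d.contains k then d.modify k [] (fun l => l ++ [b]) else d.insert k [b])
      = d.modify k [] (fun l => l ++ [b]) := by
  by_cases h : d.contains k = true
  · rw [if_pos h]
  · rw [if_neg h, PySem.Dict.modify, PySem.Dict.getD_of_not_contains]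
    · simp
    · simpa using h

theorem pvFoldSplit (cb : List (String × String)) (ab : List (List (String × String)))
    (d : PySem.Dict String (List (List (String × String)))) (nc : List (List (String × String))) :
    ab.foldl
      (fun (st : PySem.Dict String (List (List (String × String))) × List (List (String × String))) belief =>
        let k := pvBeliefName belief
        if pvIsCommonKey cb k then
          if st.1.contains k then (st.1.modify k [] (fun l => l ++ [belief]), st.2)
          else (st.1.insert k [belief], st.2)
        else (st.1, st.2 ++ [belief])) (d, nc)
    = ((ab.filter (fun b => pvIsCommonKey cb (pvBeliefName b))).foldl
         (fun d b => d.modify (pvBeliefName b) [] (fun l => l ++ [b])) d,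
       nc ++ ab.filter (fun b => !(pvIsCommonKey cb (pvBeliefName b)))) := by
  induction ab generalizing d nc with
  | nil => simp
  | cons b rest ih =>
    simp only [List.foldl_cons, List.filter_cons]
    by_cases h : pvIsCommonKey cb (pvBeliefName b) = true
    · simp only [h, if_pos, Bool.not_true]
      rw [show (if d.contains (pvBeliefName b) then (d.modify (pvBeliefName b) [] (fun l => l ++ [b]), nc)
            else (d.insert (pvBeliefName b) [b], nc))
          = ((if d.contains (pvBeliefName b) then d.modify (pvBeliefName b) [] (fun l => l ++ [b])
              else d.insert (pvBeliefName b) [b]), nc) from by split <;> rfl,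
        pvStepA]
      simpa using ih _ nc
    · simp only [Bool.not_eq_true] at h
      simp only [h, Bool.not_false, ite_true, ite_false, Bool.false_eq_true]
      rw [ih]
      simp

theorem pvKeysEq (cb : List (String × String)) (names : List String) :
    names.foldl
      (fun (ks : List String) nm =>
        if pvIsCommonKey cb nm && !(ks.contains nm) then ks ++ [nm] else ks) []
    = PySem.Set.ofList (names.filter (fun nm => pvIsCommonKey cb nm)) := by
  conv_rhs => rw [PySem.Set.ofList_eq_foldl, List.foldl_filter]
  congr 1
  funext ks nm
  cases h : pvIsCommonKey cb nm
  · simp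
  · simp only [Bool.true_and, if_true]
    rw [PySem.Set.add_eq_ite]
    by_cases hm : nm ∈ ks
    · simp [hm]
    · simp [hm]

theorem pvGroup (cb : List (String × String)) (ab : List (List (String × String))) (k : String)
    (hk : pvIsCommonKey cb k = true) :
    ((ab.filter (fun b => pvIsCommonKey cb (pvBeliefName b))).foldl
        (fun d b => d.modify (pvBeliefName b) [] (fun l => l ++ [b])) PySem.Dict.empty).getD k []
      = ab.filter (fun b => pvBeliefName b == k) := by
  have h1 : (ab.filter (fun b => pvIsCommonKey cb (pvBeliefName b))).foldl
        (fun d b => d.modify (pvBeliefName b) [] (fun l => l ++ [b])) PySem.Dict.empty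
      = ((ab.filter (fun b => pvIsCommonKey cb (pvBeliefName b))).map (fun b => (pvBeliefName b, b))).foldl
        (fun d p => d.modify p.1 [] (fun l => l ++ [p.2])) PySem.Dict.empty := by
    rw [List.foldl_map]
  rw [h1, PySem.Dict.getD_foldl_modify_append]
  rw [PySem.Dict.getD_empty]
  rw [List.filter_map, List.map_map]
  simp only [Function.comp_def, List.map_id']
  rw [List.filter_filter]
  apply List.filter_congr
  intro b _
  cases h : (pvBeliefName b == k)
  · simp
  · have : pvBeliefName b = k := by simpa using h
    simp [this, hk]

theorem pvKeysD (cb : List (String × String)) (ab : List (List (String × String))) :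
    ((ab.filter (fun b => pvIsCommonKey cb (pvBeliefName b))).foldl
        (fun d b => d.modify (pvBeliefName b) [] (fun l => l ++ [b])) PySem.Dict.empty).keys
      = PySem.Set.ofList ((ab.map pvBeliefName).filter (fun nm => pvIsCommonKey cb nm)) := by
  rw [PySem.Dict.keys_foldl_modify_key, PySem.Dict.keys_empty, PySem.Set.update_nil_left,
    List.filter_map]
  simp [Function.comp_def]

-- ===== VERDICT (by name: the statement is the Claim_ definition above) =====
theorem separate_common_beliefs_spec : Claim_equal_separate_common_beliefs := by
  intro ab cb _ _
  unfold Spec_separate_common_beliefs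

  unfold separate_common_beliefs separate_common_beliefs_alt
  simp only [pvCommon_eq]
  rw [pvFoldSplit, pvKeysEq]
  dsimp only
  simp only [List.nil_append]
  refine Prod.ext ?_ ((pvZipFilter ab (fun s => !pvIsCommonKey cb s)).symm)
  set D := ((ab.filter (fun b => pvIsCommonKey cb (pvBeliefName b))).foldl
      (fun d b => d.modify (pvBeliefName b) [] (fun l => l ++ [b])) PySem.Dict.empty) with hD
  have hnd : D.keys.Nodup := by
    rw [hD]
    exact PySem.Dict.nodup_keys_foldl_modify_key _ _ _ _ _ (by simp)
  rw [PySem.Dict.items_eq_map_keys D hnd []]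
  rw [pvKeysD]
  apply List.map_congr_left
  intro k hk
  have hkc : pvIsCommonKey cb k = true := by
    have := (PySem.Set.mem_ofList _ _).mp hk
    simp only [List.mem_filter] at this
    exact this.2
  rw [pvZipFilter ab (fun s => s == k), hD, pvGroup cb ab k hkc]
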